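-- pv_equiv track=rewrite | github.com/semirhamid/CompetitiveProgramming | 2100-find-good-days-to-rob-the-bank/2100-find-good-days-to-rob-the-bank.py | goodDaysToRobBank
-- ===== SOURCE A (Python) =====
-- from typing import List
--
-- def goodDaysToRobBank(security: List[int], time: int) -> List[int]:
--     length = len(security)
--     prefix = [0] * length
--     for i in range(1, length):
--         if security[i] <= security[i - 1]:
--             prefix[i] = prefix[i - 1] + 1
--     postfix = [0] * length
--     for i in range(length -2, -1, -1):
--         if security[i] <= security[i + 1]:
--             postfix[i] = postfix[i + 1] + 1
--     result = []
--     for i in range(length):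
--         if prefix[i] >= time and postfix[i] >= time:
--             result.append(i)
--     return result
-- ===== SOURCE B (Python) =====
-- from typing import List
--
-- def goodDaysToRobBank(security: List[int], time: int) -> List[int]:
--     # Prefix sums of monotonicity violations: U counts strict rises, D counts
--     # strict falls.  Day i is good iff the window (i-t, i] has no rise and the
--     # window (i, i+t] has no fall, each an O(1) prefix-sum difference check.
--     n = len(security)
--     t = max(time, 0)
--     U = [0]
--     D = [0]
--     for j in range(1, n):
--         U.append(U[-1] + (1 if security[j - 1] < security[j] else 0))
--         D.append(D[-1] + (1 if security[j] < security[j - 1] else 0))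
--     return [i for i in range(t, n - t) if U[i] == U[i - t] and D[i + t] == D[i]]
-- ===== Notes on version B (the rewrite author's own statement) =====
-- stated objective: alternative
-- what changed: B abandons run-length counting entirely: it builds prefix sums U/D of strict rise/fall violation indicators and declares day i good iff the windows (i-t,i] and (i,i+t] contain zero violations, each an O(1) prefix-sum difference test over the pre-restricted index range [t, n-t).
import Mathlib
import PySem

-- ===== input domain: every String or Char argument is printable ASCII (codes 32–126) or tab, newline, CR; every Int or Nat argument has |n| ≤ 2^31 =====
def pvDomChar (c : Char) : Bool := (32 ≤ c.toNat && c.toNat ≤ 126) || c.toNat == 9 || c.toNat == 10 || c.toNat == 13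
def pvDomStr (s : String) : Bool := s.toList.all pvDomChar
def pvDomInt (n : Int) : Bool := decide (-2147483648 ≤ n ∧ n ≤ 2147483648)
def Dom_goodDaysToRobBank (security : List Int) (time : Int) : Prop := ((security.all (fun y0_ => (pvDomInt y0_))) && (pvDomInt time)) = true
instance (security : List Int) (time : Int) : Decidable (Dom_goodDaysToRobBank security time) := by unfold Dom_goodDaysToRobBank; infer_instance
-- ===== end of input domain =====

-- B replaces A's run-length counting (prefix/postfix run arrays) by prefix sums of
-- monotonicity-violation indicators with O(1) window-emptiness tests (objective: alternative).

-- ===== PORT A =====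
-- three passes: fill prefix array, fill postfix array (backwards), then filter
def goodDaysToRobBank (security : List Int) (time : Int) : List Int :=
  let length := security.length
  let pre := (List.range' 1 (length - 1)).foldl
      (fun p i => if security.getD i 0 ≤ security.getD (i - 1) 0
                  then p.set i (p.getD (i - 1) 0 + 1) else p)
      (List.replicate length (0 : Int))
  let post := (List.range (length - 1)).reverse.foldl
      (fun p i => if security.getD i 0 ≤ security.getD (i + 1) 0
                  then p.set i (p.getD (i + 1) 0 + 1) else p)
      (List.replicate length (0 : Int))
  (List.range length).foldl
      (fun r i => if time ≤ pre.getD i 0 ∧ time ≤ post.getD i 0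
                  then r ++ [(i : Int)] else r) []

-- ===== PORT B =====
-- one pass builds prefix sums U (strict rises) and D (strict falls); then a list
-- comprehension over range(t, n-t) keeps i iff both windows are violation-free.
-- (U[-1]/D[-1] index a list that is nonempty by construction: ported as getLastD, exact here.)
def goodDaysToRobBank_alt (security : List Int) (time : Int) : List Int :=
  let n := security.length
  let t := max time 0
  let ud := (List.range' 1 (n - 1)).foldl
      (fun (ud : List Int × List Int) j =>
        (ud.1 ++ [ud.1.getLastD 0 + (if security.getD (j - 1) 0 < security.getD j 0 then 1 else 0)],
         ud.2 ++ [ud.2.getLastD 0 + (if security.getD j 0 < security.getD (j - 1) 0 then 1 else 0)]))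
      ([(0 : Int)], [(0 : Int)])
  (PySem.List.pyRange t ((n : Int) - t) 1).foldl
      (fun r i => if PySem.List.pyGetD ud.1 i 0 = PySem.List.pyGetD ud.1 (i - t) 0 ∧
                     PySem.List.pyGetD ud.2 (i + t) 0 = PySem.List.pyGetD ud.2 i 0
                  then r ++ [i] else r) []

-- ===== PRECONDITION & SPEC =====
def Spec_goodDaysToRobBank (security : List Int) (time : Int) (out : List Int) : Prop := out = goodDaysToRobBank_alt security time
instance (security : List Int) (time : Int) (out : List Int) : Decidable (Spec_goodDaysToRobBank security time out) := by unfold Spec_goodDaysToRobBank; infer_instance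

-- ===== CLAIM (what is proved, stated in full; the proofs are below) =====
def Claim_equal_goodDaysToRobBank : Prop := ∀ (security : List Int) (time : Int), Dom_goodDaysToRobBank security time → Spec_goodDaysToRobBank security time (goodDaysToRobBank security time)

-- ===== LEMMAS AND PROOFS =====

-- mathematical run-length functions A's port is proved to compute
def prefFun (s : List Int) : Nat → Int
  | 0 => 0
  | i + 1 => if s.getD (i + 1) 0 ≤ s.getD i 0 then prefFun s i + 1 else 0

def postAux (s : List Int) : Nat → Int
  | 0 => 0
  | d + 1 => if s.getD (s.length - 1 - (d + 1)) 0 ≤ s.getD (s.length - (d + 1)) 0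
             then postAux s d + 1 else 0

def postFun (s : List Int) (i : Nat) : Int := postAux s (s.length - 1 - i)

-- A's two array-filling folds, parameterised by the number of processed loop iterations
def preAfold (s : List Int) (k : Nat) : List Int :=
  (List.range' 1 k).foldl
    (fun p i => if s.getD i 0 ≤ s.getD (i - 1) 0
                then p.set i (p.getD (i - 1) 0 + 1) else p)
    (List.replicate s.length (0 : Int))

def postAfold (s : List Int) (t : Nat) : List Int :=
  ((List.range' (s.length - 1 - t) t).reverse).foldl
    (fun p i => if s.getD i 0 ≤ s.getD (i + 1) 0
                then p.set i (p.getD (i + 1) 0 + 1) else p)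
    (List.replicate s.length (0 : Int))

theorem postFun_last (s : List Int) (i : Nat) (h : s.length ≤ i + 1) : postFun s i = 0 := by
  unfold postFun
  have : s.length - 1 - i = 0 := by omega
  rw [this]; rfl

theorem postFun_step (s : List Int) (i : Nat) (h : i + 1 < s.length) :
    postFun s i = if s.getD i 0 ≤ s.getD (i + 1) 0 then postFun s (i + 1) + 1 else 0 := by
  unfold postFun
  have h1 : s.length - 1 - i = (s.length - 1 - (i + 1)) + 1 := by omega
  rw [h1]
  conv_lhs => rw [postAux]
  have h2 : s.length - 1 - ((s.length - 1 - (i + 1)) + 1) = i := by omega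
  have h3 : s.length - ((s.length - 1 - (i + 1)) + 1) = i + 1 := by omega
  rw [h2, h3]

theorem getD_set_self (l : List Int) (i : Nat) (v : Int) (h : i < l.length) :
    (l.set i v).getD i 0 = v := by
  simp [List.getD, h]

theorem getD_set_ne (l : List Int) (i j : Nat) (v : Int) (h : i ≠ j) :
    (l.set i v).getD j 0 = l.getD j 0 := by
  simp [List.getD, List.getElem?_set_ne h]

theorem preA_inv (s : List Int) (k : Nat) (hk : k ≤ s.length - 1) :
    (preAfold s k).length = s.length ∧
    (∀ i, i < s.length → i ≤ k → (preAfold s k).getD i 0 = prefFun s i) ∧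
    (∀ i, k < i → (preAfold s k).getD i 0 = 0) := by
  induction k with
  | zero =>
    refine ⟨by simp [preAfold], ?_, ?_⟩
    · intro i _ hi
      interval_cases i
      simp [preAfold, prefFun]
    · intro i _
      simp [preAfold]
  | succ k ih =>
    obtain ⟨hlen, hget, hzero⟩ := ih (by omega)
    have hstep : preAfold s (k + 1) =
        (fun p i => if s.getD i 0 ≤ s.getD (i - 1) 0
                    then p.set i (p.getD (i - 1) 0 + 1) else p) (preAfold s k) (1 + k) := by
      unfold preAfold
      rw [List.range'_concat, List.foldl_append]
      norm_num
    have h1k : 1 + k = k + 1 := by omega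
    have hkn : k + 1 < s.length := by omega
    rw [hstep, h1k]
    simp only [Nat.add_sub_cancel]
    by_cases hc : s.getD (k + 1) 0 ≤ s.getD k 0
    · rw [if_pos hc]
      refine ⟨by simp [hlen], ?_, ?_⟩
      · intro i hi hik
        by_cases hieq : i = k + 1
        · subst hieq
          rw [getD_set_self _ _ _ (by omega),
              hget k (by omega) (by omega)]
          rw [prefFun, if_pos hc]
        · rw [getD_set_ne _ _ _ _ (by omega)]
          exact hget i hi (by omega)
      · intro i hi
        rw [getD_set_ne _ _ _ _ (by omega)]
        exact hzero i (by omega)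
    · rw [if_neg hc]
      refine ⟨hlen, ?_, ?_⟩
      · intro i hi hik
        by_cases hieq : i = k + 1
        · subst hieq
          rw [hzero (k + 1) (by omega), prefFun, if_neg hc]
        · exact hget i hi (by omega)
      · intro i hi
        exact hzero i (by omega)

theorem postA_inv (s : List Int) (t : Nat) (ht : t ≤ s.length - 1) :
    (postAfold s t).length = s.length ∧
    (∀ i, i < s.length → s.length - 1 - t ≤ i → (postAfold s t).getD i 0 = postFun s i) ∧
    (∀ i, i < s.length - 1 - t → (postAfold s t).getD i 0 = 0) := by
  induction t with
  | zero =>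
    refine ⟨by simp [postAfold], ?_, ?_⟩
    · intro i hi hi2
      have : i = s.length - 1 := by omega
      subst this
      rw [postFun_last s _ (by omega)]
      simp [postAfold]
    · intro i _
      simp [postAfold]
  | succ t ih =>
    obtain ⟨hlen, hget, hzero⟩ := ih (by omega)
    have hi0 : s.length - 1 - (t + 1) + 1 = s.length - 1 - t := by omega
    have hstep : postAfold s (t + 1) =
        (fun p i => if s.getD i 0 ≤ s.getD (i + 1) 0
                    then p.set i (p.getD (i + 1) 0 + 1) else p)
          (postAfold s t) (s.length - 1 - (t + 1)) := by
      unfold postAfold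
      rw [List.range'_succ, hi0]
      rw [List.reverse_cons, List.foldl_append]
      rfl
    set i0 := s.length - 1 - (t + 1) with hi0def
    have hi0n : i0 + 1 < s.length := by omega
    have hpf := postFun_step s i0 hi0n
    rw [hstep]
    beta_reduce
    by_cases hc : s.getD i0 0 ≤ s.getD (i0 + 1) 0
    · rw [if_pos hc]
      refine ⟨by simp [hlen], ?_, ?_⟩
      · intro i hi hit
        by_cases hieq : i = i0
        · subst hieq
          rw [getD_set_self _ _ _ (by omega),
              hget (i0 + 1) (by omega) (by omega), hpf, if_pos hc]
        · rw [getD_set_ne _ _ _ _ (by omega)]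
          exact hget i hi (by omega)
      · intro i hi
        rw [getD_set_ne _ _ _ _ (by omega)]
        exact hzero i (by omega)
    · rw [if_neg hc]
      refine ⟨hlen, ?_, ?_⟩
      · intro i hi hit
        by_cases hieq : i = i0
        · subst hieq
          rw [hzero i0 (by omega), hpf, if_neg hc]
        · exact hget i hi (by omega)
      · intro i hi
        exact hzero i (by omega)

-- folding 'if P i then r ++ [f i] else r' is filter-then-map
theorem foldl_filter_map (P : Nat → Prop) [DecidablePred P] (f : Nat → Int) :
    ∀ (l : List Nat) (acc : List Int),
      l.foldl (fun r i => if P i then r ++ [f i] else r) acc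
      = acc ++ (l.filter (fun i => decide (P i))).map f := by
  intro l
  induction l with
  | nil => intro acc; simp
  | cons x xs ih =>
    intro acc
    by_cases hx : P x
    · simp [hx, ih]
    · simp [hx, ih]

-- B-side: prefix sums of violation indicators
def Ufun (s : List Int) : Nat → Int
  | 0 => 0
  | j + 1 => Ufun s j + (if s.getD j 0 < s.getD (j + 1) 0 then 1 else 0)

def Dfun (s : List Int) : Nat → Int
  | 0 => 0
  | j + 1 => Dfun s j + (if s.getD (j + 1) 0 < s.getD j 0 then 1 else 0)

theorem UD_fold (s : List Int) (k : Nat) :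
    (List.range' 1 k).foldl
      (fun (ud : List Int × List Int) j =>
        (ud.1 ++ [ud.1.getLastD 0 + (if s.getD (j - 1) 0 < s.getD j 0 then 1 else 0)],
         ud.2 ++ [ud.2.getLastD 0 + (if s.getD j 0 < s.getD (j - 1) 0 then 1 else 0)]))
      ([(0 : Int)], [(0 : Int)])
    = ((List.range (k + 1)).map (Ufun s), (List.range (k + 1)).map (Dfun s)) := by
  induction k with
  | zero => simp [Ufun, Dfun]
  | succ k ih =>
    rw [List.range'_concat, List.foldl_append, ih]
    simp only [List.foldl_cons, List.foldl_nil]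
    have h1k : 1 + 1 * k = k + 1 := by omega
    rw [h1k]
    have hsub : k + 1 - 1 = k := by omega
    rw [hsub]
    have hlastU : ((List.range (k + 1)).map (Ufun s)).getLastD 0 = Ufun s k := by
      rw [List.range_succ]; simp
    have hlastD : ((List.range (k + 1)).map (Dfun s)).getLastD 0 = Dfun s k := by
      rw [List.range_succ]; simp
    rw [hlastU, hlastD]
    refine Prod.ext ?_ ?_
    · simp only
      conv_rhs => rw [List.range_succ]
      rw [List.map_append]
      simp [Ufun]
    · simp only
      conv_rhs => rw [List.range_succ]
      rw [List.map_append]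
      simp [Dfun]

theorem prefFun_nonneg (s : List Int) (i : Nat) : 0 ≤ prefFun s i := by
  induction i with
  | zero => simp [prefFun]
  | succ i ih =>
    rw [prefFun]
    split_ifs
    · omega
    · omega

theorem prefFun_le (s : List Int) (i : Nat) : prefFun s i ≤ (i : Int) := by
  induction i with
  | zero => simp [prefFun]
  | succ i ih =>
    rw [prefFun]
    split_ifs
    · push_cast; omega
    · push_cast; omega

theorem postAux_nonneg (s : List Int) (d : Nat) : 0 ≤ postAux s d := by
  induction d with
  | zero => simp [postAux]
  | succ d ih =>
    rw [postAux]
    split_ifs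
    · omega
    · omega

theorem postAux_le (s : List Int) (d : Nat) : postAux s d ≤ (d : Int) := by
  induction d with
  | zero => simp [postAux]
  | succ d ih =>
    rw [postAux]
    split_ifs
    · push_cast; omega
    · push_cast; omega

theorem postFun_nonneg (s : List Int) (i : Nat) : 0 ≤ postFun s i := postAux_nonneg s _

theorem postFun_le (s : List Int) (i : Nat) : postFun s i ≤ ((s.length - 1 - i : Nat) : Int) :=
  postAux_le s _

theorem Ufun_mono (s : List Int) (j i : Nat) (h : j ≤ i) : Ufun s j ≤ Ufun s i := by
  induction i with
  | zero =>
    have : j = 0 := by omega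
    subst this; exact le_refl _
  | succ i ih =>
    by_cases hj : j = i + 1
    · subst hj; exact le_refl _
    · have := ih (by omega)
      rw [Ufun]
      split_ifs
      · omega
      · omega

theorem Dfun_mono (s : List Int) (j i : Nat) (h : j ≤ i) : Dfun s j ≤ Dfun s i := by
  induction i with
  | zero =>
    have : j = 0 := by omega
    subst this; exact le_refl _
  | succ i ih =>
    by_cases hj : j = i + 1
    · subst hj; exact le_refl _
    · have := ih (by omega)
      rw [Dfun]
      split_ifs
      · omega
      · omega

-- window emptiness in U ⟺ non-increasing run of length ≥ k ends at i
theorem U_iff_pref (s : List Int) (k : Nat) :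
    ∀ i : Nat, k ≤ i → (Ufun s i = Ufun s (i - k) ↔ (k : Int) ≤ prefFun s i) := by
  induction k with
  | zero =>
    intro i _
    simp [prefFun_nonneg]
  | succ k ih =>
    intro i hk
    obtain ⟨i', rfl⟩ : ∃ i', i = i' + 1 := ⟨i - 1, by omega⟩
    have hki : k ≤ i' := by omega
    have hsub : i' + 1 - (k + 1) = i' - k := by omega
    rw [hsub]
    have hmono := Ufun_mono s (i' - k) i' (by omega)
    rw [Ufun, prefFun]
    by_cases hc : s.getD (i' + 1) 0 ≤ s.getD i' 0
    · rw [if_neg (show ¬(s.getD i' 0 < s.getD (i' + 1) 0) by omega), if_pos hc]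
      constructor
      · intro h
        have hU : Ufun s i' = Ufun s (i' - k) := by omega
        have := (ih i' hki).mp hU
        push_cast; omega
      · intro h
        have : (k : Int) ≤ prefFun s i' := by push_cast at h; omega
        have := (ih i' hki).mpr this
        omega
    · rw [if_pos (show s.getD i' 0 < s.getD (i' + 1) 0 by omega), if_neg hc]
      constructor
      · intro h; omega
      · intro h; omega

-- window emptiness in D ⟺ non-decreasing run of length ≥ k starts at i
theorem D_iff_post (s : List Int) (k : Nat) :
    ∀ i : Nat, i < s.length → i + k ≤ s.length - 1 →
      (Dfun s (i + k) = Dfun s i ↔ (k : Int) ≤ postFun s i) := by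
  induction k with
  | zero =>
    intro i _ _
    simp [postFun_nonneg]
  | succ k ih =>
    intro i hi hik
    have hi1 : i + 1 < s.length := by omega
    have hpf := postFun_step s i hi1
    have hadd : i + (k + 1) = (i + 1) + k := by omega
    rw [hadd]
    have hmono := Dfun_mono s (i + 1) ((i + 1) + k) (by omega)
    have hDstep : Dfun s (i + 1) = Dfun s i + (if s.getD (i + 1) 0 < s.getD i 0 then 1 else 0) := by
      rw [Dfun]
    by_cases hc : s.getD i 0 ≤ s.getD (i + 1) 0
    · rw [hpf, if_pos hc]
      have hε : Dfun s (i + 1) = Dfun s i := by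
        rw [hDstep, if_neg (by omega)]; omega
      constructor
      · intro h
        have hD : Dfun s ((i + 1) + k) = Dfun s (i + 1) := by omega
        have := (ih (i + 1) hi1 (by omega)).mp hD
        push_cast; omega
      · intro h
        have : (k : Int) ≤ postFun s (i + 1) := by push_cast at h; omega
        have := (ih (i + 1) hi1 (by omega)).mpr this
        omega
    · rw [hpf, if_neg hc]
      have hε : Dfun s (i + 1) = Dfun s i + 1 := by
        rw [hDstep, if_pos (by omega)]
      constructor
      · intro h; omega
      · intro h; omega

-- the pointwise bridge: A's condition at i < n equals B's window condition with T = max(time,0)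
theorem cond_bridge (s : List Int) (time : Int) (i : Nat) (hi : i < s.length) :
    (time ≤ prefFun s i ∧ time ≤ postFun s i) ↔
    ((max time 0).toNat ≤ i ∧ i + (max time 0).toNat + 1 ≤ s.length ∧
      Ufun s i = Ufun s (i - (max time 0).toNat) ∧
      Dfun s (i + (max time 0).toNat) = Dfun s i) := by
  set T := (max time 0).toNat with hT
  have hTt : (T : Int) = max time 0 := by
    rw [hT]; omega
  have hpre : time ≤ prefFun s i ↔ (T : Int) ≤ prefFun s i := by
    have := prefFun_nonneg s i
    constructor <;> intro h <;> omega
  have hpost : time ≤ postFun s i ↔ (T : Int) ≤ postFun s i := by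
    have := postFun_nonneg s i
    constructor <;> intro h <;> omega
  rw [hpre, hpost]
  constructor
  · rintro ⟨h1, h2⟩
    have hTi : T ≤ i := by
      by_contra hlt
      have := prefFun_le s i
      omega
    have hTn : i + T + 1 ≤ s.length := by
      by_contra hgt
      have := postFun_le s i
      omega
    exact ⟨hTi, hTn, (U_iff_pref s T i hTi).mpr h1,
      (D_iff_post s T i hi (by omega)).mpr h2⟩
  · rintro ⟨hTi, hTn, hU, hD⟩
    exact ⟨(U_iff_pref s T i hTi).mp hU, (D_iff_post s T i hi (by omega)).mp hD⟩

theorem equiv_main (security : List Int) (time : Int) :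
    goodDaysToRobBank security time = goodDaysToRobBank_alt security time := by
  set s := security with hs
  set n := s.length with hn
  set T := (max time 0).toNat with hT
  have hTnn : (0 : Int) ≤ max time 0 := by omega
  have hTt : ((T : Int)) = max time 0 := by rw [hT]; omega
  -- A in normal form
  have hA : goodDaysToRobBank s time
      = ((List.range n).filter
          (fun i => decide (time ≤ prefFun s i ∧ time ≤ postFun s i))).map
          (fun i => Int.ofNat i) := by
    simp only [goodDaysToRobBank]
    by_cases hn0 : n = 0
    · rw [← hn, hn0]; rfl
    have hpreEq : (List.range' 1 (s.length - 1)).foldl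
        (fun p i => if s.getD i 0 ≤ s.getD (i - 1) 0
                    then p.set i (p.getD (i - 1) 0 + 1) else p)
        (List.replicate s.length (0 : Int)) = preAfold s (s.length - 1) := rfl
    have hpostEq : ((List.range (s.length - 1)).reverse).foldl
        (fun p i => if s.getD i 0 ≤ s.getD (i + 1) 0
                    then p.set i (p.getD (i + 1) 0 + 1) else p)
        (List.replicate s.length (0 : Int)) = postAfold s (s.length - 1) := by
      unfold postAfold
      rw [List.range_eq_range', Nat.sub_self]
    rw [hpreEq, hpostEq]
    obtain ⟨_, hpre, _⟩ := preA_inv s (s.length - 1) (by omega)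
    obtain ⟨_, hpost, _⟩ := postA_inv s (s.length - 1) (by omega)
    have hcongr := PySem.List.foldl_congr_mem (List.range s.length)
      (fun r i => if time ≤ (preAfold s (s.length - 1)).getD i 0 ∧
                     time ≤ (postAfold s (s.length - 1)).getD i 0
                  then r ++ [(i : Int)] else r)
      (fun r i => if time ≤ prefFun s i ∧ time ≤ postFun s i
                  then r ++ [(i : Int)] else r)
      []
      (by
        intro acc x hx
        beta_reduce
        have hxn : x < s.length := List.mem_range.mp hx
        rw [hpre x hxn (by omega), hpost x hxn (by omega)])
    rw [hcongr, foldl_filter_map]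
    simp
    rfl
  -- B in normal form: filter over the window range' T (n - 2T)
  have hB : goodDaysToRobBank_alt s time
      = ((List.range' T ((n : Int) - 2 * (T : Int)).toNat).filter
          (fun i => decide (Ufun s i = Ufun s (i - T) ∧ Dfun s (i + T) = Dfun s i))).map
          (fun i => Int.ofNat i) := by
    simp only [goodDaysToRobBank_alt]
    by_cases hn0 : n = 0
    · rw [← hn, hn0]
      rw [PySem.List.pyRange_one_eq_nil (by omega)]
      have h0 : (((0 : Nat) : Int) - 2 * (T : Int)).toNat = 0 := by omega
      rw [h0]
      simp
    -- the built lists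
    have hud := UD_fold s (n - 1)
    have hn1 : n - 1 + 1 = n := by omega
    rw [hn1] at hud
    rw [← hn, hud]
    -- range as a map over Nat range
    rw [PySem.List.pyRange_one, List.foldl_map]
    set W := (((n : Int) - max time 0) - max time 0).toNat with hW
    have hWW : W = ((n : Int) - 2 * (T : Int)).toNat := by omega
    -- rewrite the body pointwise on range W
    have hcongr := PySem.List.foldl_congr_mem (List.range W)
      (fun (r : List Int) (k : Nat) =>
        if PySem.List.pyGetD ((List.range n).map (Ufun s)) (max time 0 + (k : Int)) 0 =
             PySem.List.pyGetD ((List.range n).map (Ufun s)) (max time 0 + (k : Int) - max time 0) 0 ∧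
           PySem.List.pyGetD ((List.range n).map (Dfun s)) (max time 0 + (k : Int) + max time 0) 0 =
             PySem.List.pyGetD ((List.range n).map (Dfun s)) (max time 0 + (k : Int)) 0
        then r ++ [max time 0 + (k : Int)] else r)
      (fun (r : List Int) (k : Nat) =>
        if Ufun s (T + k) = Ufun s ((T + k) - T) ∧ Dfun s ((T + k) + T) = Dfun s (T + k)
        then r ++ [(Int.ofNat (T + k))] else r)
      []
      (by
        intro acc k hk
        beta_reduce
        have hkW : k < W := List.mem_range.mp hk
        have hkb : (k : Int) < ((n : Int) - max time 0) - max time 0 := by omega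
        have h1 : max time 0 + (k : Int) = ((T + k : Nat) : Int) := by push_cast; omega
        have h2 : max time 0 + (k : Int) - max time 0 = ((k : Nat) : Int) := by omega
        have h3 : max time 0 + (k : Int) + max time 0 = (((T + k) + T : Nat) : Int) := by push_cast; omega
        have hb1 : T + k < n := by omega
        have hb2 : k < n := by omega
        have hb3 : (T + k) + T < n := by omega
        rw [h2, h3, h1]
        simp only [PySem.List.pyGetD_natCast]
        rw [PySem.List.getD_map_range (Ufun s) _ _ _ hb1, PySem.List.getD_map_range (Ufun s) _ _ _ hb2,
            PySem.List.getD_map_range (Dfun s) _ _ _ hb3, PySem.List.getD_map_range (Dfun s) _ _ _ hb1]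
        have hsub : (T + k) - T = k := by omega
        rw [hsub, Int.ofNat_eq_natCast])
    rw [hcongr, foldl_filter_map (fun k => Ufun s (T + k) = Ufun s ((T + k) - T) ∧
          Dfun s ((T + k) + T) = Dfun s (T + k)) (fun k => Int.ofNat (T + k)) (List.range W) []]
    rw [hWW] at *
    rw [List.range'_eq_map_range, List.filter_map, List.map_map]
    rw [List.nil_append]
    congr 1
  rw [hA, hB]
  -- combine: the filters agree
  set W := ((n : Int) - 2 * (T : Int)).toNat with hW
  by_cases h2T : 2 * T ≤ n
  · have hTW : T + W + T = n := by omega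
    have e1 : List.range' 0 T ++ List.range' T W = List.range' 0 (T + W) := by
      have h := List.range'_append (s := 0) (m := T) (n := W) (step := 1)
      simpa using h
    have e2 : List.range' 0 (T + W) ++ List.range' (T + W) T = List.range' 0 (T + W + T) := by
      have h := List.range'_append (s := 0) (m := T + W) (n := T) (step := 1)
      simpa using h
    have hsplit : List.range n = (List.range' 0 T ++ List.range' T W) ++ List.range' (T + W) T := by
      rw [e1, e2, hTW, List.range_eq_range']
    rw [hsplit, List.filter_append, List.filter_append]
    have hleft : (List.range' 0 T).filter
        (fun i => decide (time ≤ prefFun s i ∧ time ≤ postFun s i)) = [] := by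
      rw [List.filter_eq_nil_iff]
      intro i hi
      have hib := List.mem_range'_1.mp hi
      simp only [decide_eq_true_eq]
      intro hP
      have := (cond_bridge s time i (by omega)).mp hP
      omega
    have hright : (List.range' (T + W) T).filter
        (fun i => decide (time ≤ prefFun s i ∧ time ≤ postFun s i)) = [] := by
      rw [List.filter_eq_nil_iff]
      intro i hi
      have hib := List.mem_range'_1.mp hi
      simp only [decide_eq_true_eq]
      intro hP
      have := (cond_bridge s time i (by omega)).mp hP
      omega
    have hmid : (List.range' T W).filter
        (fun i => decide (time ≤ prefFun s i ∧ time ≤ postFun s i))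
        = (List.range' T W).filter
            (fun i => decide (Ufun s i = Ufun s (i - T) ∧ Dfun s (i + T) = Dfun s i)) := by
      apply List.filter_congr
      intro i hi
      have hib := List.mem_range'_1.mp hi
      simp only [decide_eq_decide]
      rw [cond_bridge s time i (by omega)]
      constructor
      · rintro ⟨_, _, hU, hD⟩; exact ⟨hU, hD⟩
      · rintro ⟨hU, hD⟩; exact ⟨by omega, by omega, hU, hD⟩
    rw [hleft, hright, hmid]
    simp
  · -- window is empty and every index fails A's condition
    have hW0 : W = 0 := by omega
    rw [hW0]
    have hleft : (List.range n).filter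
        (fun i => decide (time ≤ prefFun s i ∧ time ≤ postFun s i)) = [] := by
      rw [List.filter_eq_nil_iff]
      intro i hi
      have hib := List.mem_range.mp hi
      simp only [decide_eq_true_eq]
      intro hP
      have := (cond_bridge s time i hib).mp hP
      omega
    rw [hleft]
    simp

-- ===== VERDICT (by name: the statement is the Claim_ definition above) =====
theorem goodDaysToRobBank_spec : Claim_equal_goodDaysToRobBank := by
  intro security time _
  unfold Spec_goodDaysToRobBank
  exact equiv_main security time
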